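-- pv_equiv track=rewrite | github.com/numb2too/training | PortSwigger/Sqli/Lab: SQL injection attack, listing the database contents on non-Oracle databases/main.py | guess_user_pass_columns
-- ===== SOURCE A (Python) =====
-- from typing import List, Optional, Tuple
--
-- def guess_user_pass_columns(columns: List[str]) -> Tuple[Optional[str], Optional[str]]:
--     # 常見命名關鍵字：user, username, login, email, mail；pass, password, passwd, hash
--     user_keys = ["username", "user_name", "user", "login", "email", "mail"]
--     pass_keys = ["password", "passwd", "pass", "pwd", "hash"]
--     lc = [c.lower() for c in columns]
--     user_col = None
--     pass_col = None
--     for key in user_keys: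
--         for i, c in enumerate(lc):
--             if key == c or (key in c and len(c) <= 32):
--                 user_col = columns[i]
--                 break
--         if user_col:
--             break
--     for key in pass_keys:
--         for i, c in enumerate(lc):
--             if key == c or (key in c and len(c) <= 32):
--                 pass_col = columns[i]
--                 break
--         if pass_col:
--             break
--     return user_col, pass_col
-- ===== SOURCE B (Python) =====
-- from typing import List, Optional, Tuple
--
-- USER_KEYS = ["username", "user_name", "user", "login", "email", "mail"]
-- PASS_KEYS = ["password", "passwd", "pass", "pwd", "hash"]
--
-- def _matches(key: str, c: str) -> bool:
--     return key == c or (key in c and len(c) <= 32)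
--
-- def _pick(keys: List[str], columns: List[str]) -> Optional[str]:
--     # argmin over columns of (rank of first matching key, column index)
--     best = None  # (rank, index, original column)
--     for i, col in enumerate(columns):
--         c = col.lower()
--         for rank, key in enumerate(keys):
--             if _matches(key, c):
--                 if best is None or (rank, i) < (best[0], best[1]):
--                     best = (rank, i, col)
--                 break
--     return best[2] if best is not None else None
--
-- def guess_user_pass_columns(columns: List[str]) -> Tuple[Optional[str], Optional[str]]:
--     return _pick(USER_KEYS, columns), _pick(PASS_KEYS, columns)
-- ===== Notes on version B (the rewrite author's own statement) =====
-- stated objective: alternative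
-- what changed: Replaces A's keys-outer priority scan (restart the whole column scan for each key until one hits) by a single columns-outer pass that computes each column's best key rank and tracks the lexicographic argmin of (key rank, column index).
import Mathlib
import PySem

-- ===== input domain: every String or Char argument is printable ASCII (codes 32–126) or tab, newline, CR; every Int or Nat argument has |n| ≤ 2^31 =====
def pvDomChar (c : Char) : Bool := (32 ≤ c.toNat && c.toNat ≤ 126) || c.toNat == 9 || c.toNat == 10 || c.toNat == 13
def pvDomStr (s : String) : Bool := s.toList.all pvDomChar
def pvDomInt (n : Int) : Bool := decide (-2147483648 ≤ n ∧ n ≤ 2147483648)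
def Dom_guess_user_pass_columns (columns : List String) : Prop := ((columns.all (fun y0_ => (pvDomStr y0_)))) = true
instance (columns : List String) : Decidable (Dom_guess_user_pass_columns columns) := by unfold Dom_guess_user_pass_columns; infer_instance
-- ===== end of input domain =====

-- B replaces A's keys-outer priority scan by one columns-outer pass tracking the (key-rank, index) argmin; alternative decomposition, same cost.


-- ===== PORT A =====
def pvUserKeys : List String := ["username", "user_name", "user", "login", "email", "mail"]
def pvPassKeys : List String := ["password", "passwd", "pass", "pwd", "hash"]

-- `key == c or (key in c and len(c) <= 32)` (identical expression in both sources)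
def pvHit (key c : String) : Bool :=
  key == c || (PySem.Str.isIn key c && decide (PySem.Str.len c ≤ 32))

-- inner `for i, c in enumerate(lc): if …: col = columns[i]; break`; the index into
-- columns is always in range, rendered as a scan over columns zipped with lc
def pvScanA (key : String) : List (String × String) → Option String
  | [] => none
  | (orig, c) :: rest => if pvHit key c then some orig else pvScanA key rest

-- outer `for key in …_keys: …; if col: break` (Python truthiness: None and "" are falsy)
def pvLoopA (pairs : List (String × String)) (acc : Option String) : List String → Option String
  | [] => acc
  | key :: rest =>
    let acc' := match pvScanA key pairs with
      | some v => some v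
      | none => acc
    if acc'.getD "" ≠ "" then acc' else pvLoopA pairs acc' rest

def guess_user_pass_columns (columns : List String) : Option String × Option String :=
  let lc := columns.map PySem.Str.lower
  let pairs := columns.zip lc
  (pvLoopA pairs none pvUserKeys, pvLoopA pairs none pvPassKeys)

-- ===== PORT B =====
-- `for rank, key in enumerate(keys): if _matches(key, c): return rank` with a counter
def pvRankB (c : String) (r : Nat) : List String → Option Nat
  | [] => none
  | key :: rest => if pvHit key c then some r else pvRankB c (r + 1) rest

-- `for i, col in enumerate(columns): …` maintaining best = (rank, index, original column)
def pvLoopB (keys : List String) (best : Option (Nat × Nat × String)) (i : Nat) :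
    List String → Option (Nat × Nat × String)
  | [] => best
  | col :: rest =>
    let c := PySem.Str.lower col
    let best' := match pvRankB c 0 keys with
      | none => best
      | some r => match best with
        | none => some (r, i, col)
        | some (br, bi, bcol) =>
          if r < br ∨ (r = br ∧ i < bi) then some (r, i, col) else some (br, bi, bcol)
    pvLoopB keys best' (i + 1) rest

def pvPickB (keys columns : List String) : Option String :=
  (pvLoopB keys none 0 columns).map (fun b => b.2.2)

def guess_user_pass_columns_alt (columns : List String) : Option String × Option String :=
  (pvPickB pvUserKeys columns, pvPickB pvPassKeys columns)

-- ===== PRECONDITION & SPEC =====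
def Spec_guess_user_pass_columns (columns : List String) (out : Option String × Option String) : Prop := out = guess_user_pass_columns_alt columns
instance (columns : List String) (out : Option String × Option String) : Decidable (Spec_guess_user_pass_columns columns out) := by unfold Spec_guess_user_pass_columns; infer_instance

-- ===== CLAIM (what is proved, stated in full; the proofs are below) =====
def Claim_equal_guess_user_pass_columns : Prop := ∀ (columns : List String), Dom_guess_user_pass_columns columns → Spec_guess_user_pass_columns columns (guess_user_pass_columns columns)

-- ===== LEMMAS AND PROOFS =====
def pvBump : Option (Nat × Nat × String) → Option (Nat × Nat × String) :=
  Option.map (fun b => (b.1 + 1, b.2.1, b.2.2))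

theorem pvRankB_shift (c : String) (ks : List String) :
    ∀ r, pvRankB c (r + 1) ks = (pvRankB c r ks).map (fun x => x + 1) := by
  induction ks with
  | nil => intro r; rfl
  | cons k rest ih =>
    intro r
    by_cases h : pvHit k c = true <;> simp [pvRankB, h, ih (r + 1), ih r]

theorem pvLoopB_nil_keys (cols : List String) :
    ∀ best i, pvLoopB [] best i cols = best := by
  induction cols with
  | nil => intro best i; rfl
  | cons col rest ih => intro best i; simpa [pvLoopB, pvRankB] using ih _ (i + 1)

theorem pvLoopB_stab (keys : List String) (cols : List String) :
    ∀ i i0 c0, i0 < i → pvLoopB keys (some (0, i0, c0)) i cols = some (0, i0, c0) := by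
  induction cols with
  | nil => intro i i0 c0 _; rfl
  | cons col rest ih =>
    intro i i0 c0 hi
    simp only [pvLoopB]
    cases h : pvRankB (PySem.Str.lower col) 0 keys with
    | none => exact ih (i + 1) i0 c0 (Nat.lt_succ_of_lt hi)
    | some r =>
      have hcond : ¬ (r < 0 ∨ (r = 0 ∧ i < i0)) := by omega
      simp only [hcond, if_false]
      exact ih (i + 1) i0 c0 (Nat.lt_succ_of_lt hi)

theorem pvLoopB_cons_nomatch (k : String) (ks : List String) (cols : List String)
    : ∀ best i, (∀ col ∈ cols, pvHit k (PySem.Str.lower col) = false) →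
      pvLoopB (k :: ks) (pvBump best) i cols = pvBump (pvLoopB ks best i cols) := by
  induction cols with
  | nil => intro best i _; rfl
  | cons col rest ih =>
    intro best i h
    have hcol : pvHit k (PySem.Str.lower col) = false := h col (List.mem_cons_self ..)
    have hrest : ∀ col ∈ rest, pvHit k (PySem.Str.lower col) = false :=
      fun col hm => h col (List.mem_cons_of_mem _ hm)
    have hrank : pvRankB (PySem.Str.lower col) 0 (k :: ks)
        = (pvRankB (PySem.Str.lower col) 0 ks).map (fun x => x + 1) := by
      simp [pvRankB, hcol, pvRankB_shift]
    simp only [pvLoopB, hrank]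
    cases hr : pvRankB (PySem.Str.lower col) 0 ks with
    | none =>
      simp only [Option.map_none]
      exact ih best (i + 1) hrest
    | some r =>
      cases best with
      | none =>
        simp only [Option.map_some, pvBump, Option.map_none]
        exact ih (some (r, i, col)) (i + 1) hrest
      | some b =>
        obtain ⟨br, bi, bcol⟩ := b
        have hiff : (r + 1 < br + 1 ∨ (r + 1 = br + 1 ∧ i < bi)) ↔ (r < br ∨ (r = br ∧ i < bi)) := by omega
        simp only [Option.map_some, pvBump]
        by_cases hc : r < br ∨ (r = br ∧ i < bi)
        · simp only [if_pos (hiff.mpr hc), if_pos hc]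
          exact ih (some (r, i, col)) (i + 1) hrest
        · simp only [if_neg (fun hx => hc (hiff.mp hx)), if_neg hc]
          exact ih (some (br, bi, bcol)) (i + 1) hrest

theorem pvLoopB_cons_match (k : String) (ks : List String) (cols : List String) :
    ∀ i best, (∀ b, best = some b → 1 ≤ b.1) →
      (∃ col ∈ cols, pvHit k (PySem.Str.lower col) = true) →
      (pvLoopB (k :: ks) best i cols).map (fun b => b.2.2)
        = cols.find? (fun col => pvHit k (PySem.Str.lower col)) := by
  induction cols with
  | nil => intro i best _ hex; simp at hex
  | cons col rest ih =>
    intro i best hbest hex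
    by_cases hcol : pvHit k (PySem.Str.lower col) = true
    · have hrank : pvRankB (PySem.Str.lower col) 0 (k :: ks) = some 0 := by
        simp [pvRankB, hcol]
      simp only [pvLoopB, hrank]
      have hbest' : (match best with
          | none => some (0, i, col)
          | some (br, bi, bcol) =>
            if 0 < br ∨ (0 = br ∧ i < bi) then some (0, i, col) else some (br, bi, bcol))
          = some (0, i, col) := by
        cases best with
        | none => rfl
        | some b =>
          obtain ⟨br, bi, bcol⟩ := b
          have h1 : 1 ≤ br := hbest (br, bi, bcol) rfl
          have : 0 < br ∨ (0 = br ∧ i < bi) := Or.inl h1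
          simp [this]
      rw [hbest', pvLoopB_stab (k :: ks) rest (i + 1) i col (Nat.lt_succ_self i)]
      simp [List.find?, hcol]
    · have hcol' : pvHit k (PySem.Str.lower col) = false := by
        cases h : pvHit k (PySem.Str.lower col) with
        | true => exact absurd h hcol
        | false => rfl
      have hex' : ∃ c ∈ rest, pvHit k (PySem.Str.lower c) = true := by
        obtain ⟨c, hc, hh⟩ := hex
        rcases List.mem_cons.mp hc with h1 | h1
        · exact absurd (h1 ▸ hh) hcol
        · exact ⟨c, h1, hh⟩
      have hrank : pvRankB (PySem.Str.lower col) 0 (k :: ks)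
          = (pvRankB (PySem.Str.lower col) 0 ks).map (fun x => x + 1) := by
        simp [pvRankB, hcol', pvRankB_shift]
      simp only [pvLoopB, hrank]
      cases hr : pvRankB (PySem.Str.lower col) 0 ks with
      | none =>
        simp only [Option.map_none]
        rw [List.find?_cons_of_neg (p := fun col => pvHit k (PySem.Str.lower col)) (by simp [hcol'])]
        exact ih (i + 1) best hbest hex'
      | some r =>
        simp only [Option.map_some]
        rw [List.find?_cons_of_neg (p := fun col => pvHit k (PySem.Str.lower col)) (by simp [hcol'])]
        cases best with
        | none =>
          exact ih (i + 1) (some (r + 1, i, col)) (by rintro b hb; cases hb; simp) hex'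
        | some b =>
          obtain ⟨br, bi, bcol⟩ := b
          by_cases hc : r + 1 < br ∨ (r + 1 = br ∧ i < bi)
          · simp only [if_pos hc]
            exact ih (i + 1) (some (r + 1, i, col)) (by rintro b hb; cases hb; simp) hex'
          · simp only [if_neg hc]
            exact ih (i + 1) (some (br, bi, bcol))
              (by rintro b hb; cases hb; exact hbest _ rfl) hex'

theorem pvScanA_zip (k : String) (cols : List String) :
    pvScanA k (cols.zip (cols.map PySem.Str.lower))
      = cols.find? (fun col => pvHit k (PySem.Str.lower col)) := by
  induction cols with
  | nil => rfl
  | cons col rest ih =>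
    by_cases h : pvHit k (PySem.Str.lower col) = true
    · simp [pvScanA, List.find?, h]
    · have h' : pvHit k (PySem.Str.lower col) = false := by
        cases hx : pvHit k (PySem.Str.lower col) with
        | true => exact absurd hx h
        | false => rfl
      simp [pvScanA, List.find?, h', ih]

theorem pvLower_empty : PySem.Str.lower "" = "" := by decide

theorem pvBump_map (x : Option (Nat × Nat × String)) :
    (pvBump x).map (fun b => b.2.2) = x.map (fun b => b.2.2) := by
  cases x <;> rfl

theorem pvPick_eq (ks : List String) (cols : List String)
    (hk : ∀ k ∈ ks, pvHit k "" = false) :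
    pvLoopA (cols.zip (cols.map PySem.Str.lower)) none ks = pvPickB ks cols := by
  induction ks with
  | nil => simp [pvLoopA, pvPickB, pvLoopB_nil_keys]
  | cons k rest ih =>
    have hk' : ∀ k' ∈ rest, pvHit k' "" = false := fun k' hm => hk k' (List.mem_cons_of_mem _ hm)
    have hkhead : pvHit k "" = false := hk k (List.mem_cons_self ..)
    by_cases hex : ∃ col ∈ cols, pvHit k (PySem.Str.lower col) = true
    · -- the key matches some column: both return the first matching column
      obtain ⟨c0, hfind⟩ : ∃ c0, cols.find? (fun col => pvHit k (PySem.Str.lower col)) = some c0 := by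
        rcases hfx : cols.find? (fun col => pvHit k (PySem.Str.lower col)) with _ | c0
        · obtain ⟨c, hc, hh⟩ := hex
          have := List.find?_eq_none.mp hfx c hc
          simp [hh] at this
        · exact ⟨c0, rfl⟩
      have hc0 : pvHit k (PySem.Str.lower c0) = true := by simpa using List.find?_some hfind
      have hc0ne : c0 ≠ "" := by
        intro hemp; rw [hemp, pvLower_empty] at hc0; exact absurd hc0 (by simp [hkhead])
      -- A side
      have hA : pvLoopA (cols.zip (cols.map PySem.Str.lower)) none (k :: rest) = some c0 := by
        simp only [pvLoopA, pvScanA_zip, hfind]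
        simp [hc0ne]
      -- B side
      have hB := pvLoopB_cons_match k rest cols 0 none (by rintro b ⟨⟩) hex
      rw [hA, pvPickB, hB, hfind]
    · -- the key matches no column: both fall through to the remaining keys
      have hall : ∀ col ∈ cols, pvHit k (PySem.Str.lower col) = false := by
        intro col hm
        cases hx : pvHit k (PySem.Str.lower col) with
        | true => exact absurd ⟨col, hm, hx⟩ hex
        | false => rfl
      have hfind : cols.find? (fun col => pvHit k (PySem.Str.lower col)) = none :=
        List.find?_eq_none.mpr (fun c hc => by simp [hall c hc])
      have hA : pvLoopA (cols.zip (cols.map PySem.Str.lower)) none (k :: rest)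
          = pvLoopA (cols.zip (cols.map PySem.Str.lower)) none rest := by
        simp [pvLoopA, pvScanA_zip, hfind]
      have hB : pvPickB (k :: rest) cols = pvPickB rest cols := by
        have h0 := pvLoopB_cons_nomatch k rest cols none 0 hall
        unfold pvPickB
        conv_lhs => rw [show (none : Option (Nat × Nat × String)) = pvBump none from rfl, h0]
        exact pvBump_map _
      rw [hA, hB]
      exact ih hk'

-- ===== VERDICT (by name: the statement is the Claim_ definition above) =====
theorem guess_user_pass_columns_spec : Claim_equal_guess_user_pass_columns := by
  intro columns _
  unfold Spec_guess_user_pass_columns guess_user_pass_columns guess_user_pass_columns_alt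
  refine Prod.ext ?_ ?_
  · exact pvPick_eq pvUserKeys columns (by decide)
  · exact pvPick_eq pvPassKeys columns (by decide)
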